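-- pv_equiv track=rewrite | github.com/Roha-Lee/sw_jungle_week_03 | roha/2573.py | melt_down_1_year
-- ===== SOURCE A (Python) =====
-- def melt_down_1_year(worlds):
--     rows = len(worlds)
--     cols = len(worlds[0])
--     visited = [[False] * cols for _ in range(rows)]
--     count = 0
--     for r in range(1, rows-1):
--         for c in range(1, cols-1):
--             if worlds[r][c] > 0 and not visited[r][c]:
--                 count += 1
--                 _melt(worlds, r, c, visited)
--     return count
--
-- def _melt(worlds, r, c, visited):
--     moves = [(-1, 0), (1, 0), (0, -1), (0, 1)]
--     rows = len(worlds)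
--     cols = len(worlds[0])
--     visited[r][c] = True
--     for dr, dc in moves:
--         nr, nc = r + dr, c + dc
--         if 0 <= nr < rows and 0 <= nc < cols and worlds[nr][nc] == 0 and not visited[nr][nc]:
--             worlds[r][c] = max(0, worlds[r][c] - 1)
--     for dr, dc in moves:
--         nr, nc = r + dr, c + dc
--         if 0 <= nr < rows and 0 <= nc < cols and worlds[nr][nc] and not visited[nr][nc]:
--             _melt(worlds, nr, nc, visited)
-- ===== SOURCE B (Python) =====
-- def melt_down_1_year(worlds):
--     # Counts components only; unlike A it does NOT mutate worlds (A only ever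
--     # rewrites cells after marking them visited, so the traversal and the count
--     # never depend on those rewrites).
--     rows = len(worlds)
--     cols = len(worlds[0])
--     visited = set()
--     count = 0
--     for r in range(1, rows - 1):
--         for c in range(1, cols - 1):
--             if worlds[r][c] > 0 and (r, c) not in visited:
--                 count += 1
--                 stack = [(r, c)]
--                 while stack:
--                     cr, cc = stack.pop()
--                     if not (0 <= cr < rows and 0 <= cc < cols
--                             and worlds[cr][cc] != 0 and (cr, cc) not in visited):
--                         continue
--                     visited.add((cr, cc))
--                     stack.extend(((cr, cc + 1), (cr, cc - 1), (cr + 1, cc), (cr - 1, cc)))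
--     return count
-- ===== Notes on version B (the rewrite author's own statement) =====
-- stated objective: simpler
-- what changed: B drops the melting entirely: instead of A's recursive _melt that mutates worlds and a visited grid, B counts components with a plain iterative flood fill over a visited set reading only the original grid (correct because A only ever rewrites cells it has already marked visited, so A's traversal and count never depend on the rewrites); B does not mutate worlds, A does.
-- outside the precondition, e.g. on melt_down_1_year([[0, 0, 0], [0, 0], [0, 0, 0]]): A returns 0, B returns 0
import Mathlib
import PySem

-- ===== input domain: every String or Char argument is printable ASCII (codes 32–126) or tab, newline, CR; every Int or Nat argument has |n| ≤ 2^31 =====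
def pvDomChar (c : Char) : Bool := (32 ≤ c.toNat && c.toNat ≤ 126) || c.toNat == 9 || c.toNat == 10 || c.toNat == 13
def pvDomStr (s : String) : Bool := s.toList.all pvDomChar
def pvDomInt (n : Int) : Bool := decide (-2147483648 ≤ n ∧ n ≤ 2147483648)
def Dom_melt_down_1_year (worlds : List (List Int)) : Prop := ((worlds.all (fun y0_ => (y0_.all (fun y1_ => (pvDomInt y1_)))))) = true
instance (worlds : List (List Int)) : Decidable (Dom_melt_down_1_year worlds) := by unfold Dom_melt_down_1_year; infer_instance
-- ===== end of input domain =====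

-- B drops A's melting mutation entirely and counts components with an iterative flood fill
-- over a visited set, reading only the original grid; A mutates `worlds` in place while B
-- does not — the equivalence proved here is about the return value only.

-- ===== PORT A =====
-- A-side grid helpers: reads/writes are only performed under 0 ≤ index guards, where
-- `.toNat` is exact (A indexes only after an explicit `0 <= i < bound` test, except the
-- top-loop reads, whose indices come from in-bounds ranges under Pre_).
def pvMoves : List (Int × Int) := [(-1, 0), (1, 0), (0, -1), (0, 1)]
def pvGGet (g : List (List Int)) (r c : Int) : Int := (g.getD r.toNat []).getD c.toNat 0
def pvGSet (g : List (List Int)) (r c : Int) (v : Int) : List (List Int) :=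
  g.set r.toNat ((g.getD r.toNat []).set c.toNat v)
def pvVGet (v : List (List Bool)) (r c : Int) : Bool := (v.getD r.toNat []).getD c.toNat false
def pvVSet (v : List (List Bool)) (r c : Int) : List (List Bool) :=
  v.set r.toNat ((v.getD r.toNat []).set c.toNat true)

-- A's `_melt`, with the in-place state (worlds, visited) threaded explicitly; the fuel
-- only makes the recursion structural (rows*cols+1 is always enough, as the proofs show).
def pvMeltA (rows cols : Int) : Nat → List (List Int) × List (List Bool) → Int → Int →
    List (List Int) × List (List Bool)
  | 0, s, _, _ => s
  | Nat.succ f, s, r, c =>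
    let s1 := (s.1, pvVSet s.2 r c)
    let s2 := pvMoves.foldl (fun t d =>
      if 0 ≤ r + d.1 ∧ r + d.1 < rows ∧ 0 ≤ c + d.2 ∧ c + d.2 < cols ∧
         pvGGet t.1 (r + d.1) (c + d.2) = 0 ∧ pvVGet t.2 (r + d.1) (c + d.2) = false
      then (pvGSet t.1 r c (max 0 (pvGGet t.1 r c - 1)), t.2) else t) s1
    pvMoves.foldl (fun t d =>
      if 0 ≤ r + d.1 ∧ r + d.1 < rows ∧ 0 ≤ c + d.2 ∧ c + d.2 < cols ∧
         ¬ pvGGet t.1 (r + d.1) (c + d.2) = 0 ∧ pvVGet t.2 (r + d.1) (c + d.2) = false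
      then pvMeltA rows cols f t (r + d.1) (c + d.2) else t) s2

def melt_down_1_year (worlds : List (List Int)) : Int :=
  let rows : Int := (worlds.length : Int)
  let cols : Int := ((worlds.headD []).length : Int)
  let fuel : Nat := worlds.length * (worlds.headD []).length + 1
  let init : (List (List Int) × List (List Bool)) × Int :=
    ((worlds, List.replicate worlds.length (List.replicate (worlds.headD []).length false)), 0)
  ((PySem.List.pyRange 1 (rows - 1) 1).foldl (fun acc r =>
    (PySem.List.pyRange 1 (cols - 1) 1).foldl (fun acc c =>
      if 0 < pvGGet acc.1.1 r c ∧ pvVGet acc.1.2 r c = false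
      then (pvMeltA rows cols fuel acc.1 r c, acc.2 + 1) else acc) acc) init).2

-- ===== PORT B =====
-- B's while-loop over the explicit stack, with `visited` a set of coordinate pairs; the
-- Lean stack keeps its top at the list head (Python pushes the four neighbours at the end
-- and pops from the end, the same pop order); the fuel only makes the loop structural
-- (5*(rows*cols+1) is enough). B never writes to the grid.
def pvFloodB (worlds : List (List Int)) (rows cols : Int) :
    Nat → PySem.Set (Int × Int) → List (Int × Int) → PySem.Set (Int × Int)
  | 0, vis, _ => vis
  | Nat.succ _, vis, [] => vis
  | Nat.succ f, vis, p :: rest =>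
    if 0 ≤ p.1 ∧ p.1 < rows ∧ 0 ≤ p.2 ∧ p.2 < cols ∧
       ¬ (worlds.getD p.1.toNat []).getD p.2.toNat 0 = 0 ∧ ¬ p ∈ vis
    then pvFloodB worlds rows cols f (PySem.Set.add vis p)
      ((p.1 - 1, p.2) :: (p.1 + 1, p.2) :: (p.1, p.2 - 1) :: (p.1, p.2 + 1) :: rest)
    else pvFloodB worlds rows cols f vis rest

def melt_down_1_year_alt (worlds : List (List Int)) : Int :=
  let rows : Int := (worlds.length : Int)
  let cols : Int := ((worlds.headD []).length : Int)
  let fuel : Nat := 5 * (worlds.length * (worlds.headD []).length + 1)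
  ((PySem.List.pyRange 1 (rows - 1) 1).foldl (fun acc r =>
    (PySem.List.pyRange 1 (cols - 1) 1).foldl (fun acc c =>
      if 0 < (worlds.getD r.toNat []).getD c.toNat 0 ∧ ¬ (r, c) ∈ acc.1
      then (pvFloodB worlds rows cols fuel acc.1 [(r, c)], acc.2 + 1) else acc) acc)
    ((PySem.Set.empty, 0) : PySem.Set (Int × Int) × Int)).2

-- ===== PRECONDITION & SPEC =====
-- Pre_ excludes empty worlds (A raises IndexError on worlds[0]) and grids with at least
-- 3 rows and 3 columns in which some row is shorter than the first row, where A's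
-- unguarded reads can raise IndexError (on some such grids A still returns: see cites).
def Pre_melt_down_1_year (worlds : List (List Int)) : Prop :=
  worlds ≠ [] ∧ (3 ≤ worlds.length → 3 ≤ (worlds.headD []).length →
    ∀ row ∈ worlds, (worlds.headD []).length ≤ row.length)
instance (worlds : List (List Int)) : Decidable (Pre_melt_down_1_year worlds) := by
  unfold Pre_melt_down_1_year; infer_instance
def pvWitness_melt_down_1_year : List (List Int) := [[0, 0, 0], [0, 9, 0], [0, 0, 0]]

def Spec_melt_down_1_year (worlds : List (List Int)) (out : Int) : Prop := out = melt_down_1_year_alt worlds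
instance (worlds : List (List Int)) (out : Int) : Decidable (Spec_melt_down_1_year worlds out) := by unfold Spec_melt_down_1_year; infer_instance

-- ===== CLAIM (what is proved, stated in full; the proofs are below) =====
def Claim_equal_melt_down_1_year : Prop := ∀ (worlds : List (List Int)), Dom_melt_down_1_year worlds → Pre_melt_down_1_year worlds → Spec_melt_down_1_year worlds (melt_down_1_year worlds)

-- ===== LEMMAS AND PROOFS =====

-- shape of the visited grid and the count of unvisited cells
def pvShape (R C : Nat) (v : List (List Bool)) : Prop :=
  v.length = R ∧ ∀ row ∈ v, row.length = C
def pvUnvis (v : List (List Bool)) : Nat :=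
  (v.map (fun row => row.countP (fun b => b = false))).sum

-- the coupling invariant between A's state (grid, visited grid) and B's visited set:
-- same shape, visited grid ↔ set membership, the set holds only in-range cells, and
-- A's grid agrees with the original grid on every unvisited cell
def pvInv (W : List (List Int)) (R C : Nat) (s : List (List Int) × List (List Bool))
    (vis : List (Int × Int)) : Prop :=
  pvShape R C s.2 ∧
  (∀ r c : Int, 0 ≤ r → r < (R : Int) → 0 ≤ c → c < (C : Int) →
    (pvVGet s.2 r c = true ↔ (r, c) ∈ vis)) ∧
  (∀ p ∈ vis, 0 ≤ p.1 ∧ p.1 < (R : Int) ∧ 0 ≤ p.2 ∧ p.2 < (C : Int)) ∧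
  (∀ r c : Int, 0 ≤ r → r < (R : Int) → 0 ≤ c → c < (C : Int) →
    pvVGet s.2 r c = false → pvGGet s.1 r c = pvGGet W r c)

lemma pvFoldlInv {α β : Type _} (P : α → Prop) (f : α → β → α)
    (h : ∀ t d, P t → P (f t d)) :
    ∀ (l : List β) (s : α), P s → P (l.foldl f s) := by
  intro l
  induction l with
  | nil => intro s hs; exact hs
  | cons d l ih => intro s hs; exact ih _ (h _ _ hs)

lemma pvFoldlCongrMem {α β : Type _} (P : α → Prop) (f g : α → β → α) :
    ∀ (l : List β), (∀ t d, d ∈ l → P t → f t d = g t d) →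
    (∀ t d, d ∈ l → P t → P (f t d)) →
    ∀ s, P s → l.foldl f s = l.foldl g s := by
  intro l
  induction l with
  | nil => intro _ _ s _; rfl
  | cons d l ih =>
    intro hfg hP s hs
    simp only [List.foldl_cons]
    rw [← hfg s d (by simp) hs]
    exact ih (fun t e he ht => hfg t e (by simp [he]) ht)
      (fun t e he ht => hP t e (by simp [he]) ht) _ (hP s d (by simp) hs)

-- paired fold: a relation preserved step by step is preserved by the folds
lemma pvFoldlRel {α β γ : Type _} (R : α → β → Prop) (f : α → γ → α) (g : β → γ → β) :
    ∀ (l : List γ), (∀ a b d, d ∈ l → R a b → R (f a d) (g b d)) →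
    ∀ a b, R a b → R (l.foldl f a) (l.foldl g b) := by
  intro l
  induction l with
  | nil => intro _ a b h; exact h
  | cons d l ih =>
    intro hstep a b h
    exact ih (fun a b e he hr => hstep a b e (by simp [he]) hr) _ _
      (hstep a b d (by simp) h)

lemma pvCountP_set_le (row : List Bool) : ∀ (cn : Nat),
    (row.set cn true).countP (fun b => b = false) ≤ row.countP (fun b => b = false) := by
  induction row with
  | nil => intro cn; simp
  | cons b t ih =>
    intro cn
    cases cn with
    | zero =>
      rw [List.set_cons_zero, List.countP_cons, List.countP_cons]
      simp only [decide_eq_true_eq]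
      split_ifs <;> simp_all
    | succ cn =>
      rw [List.set_cons_succ, List.countP_cons, List.countP_cons]
      have := ih cn
      omega

lemma pvCountP_set_lt (row : List Bool) : ∀ (cn : Nat), cn < row.length →
    row.getD cn false = false →
    (row.set cn true).countP (fun b => b = false) < row.countP (fun b => b = false) := by
  induction row with
  | nil => intro cn h; simp at h
  | cons b t ih =>
    intro cn h hf
    cases cn with
    | zero =>
      simp only [List.getD_cons_zero] at hf
      subst hf
      rw [List.set_cons_zero, List.countP_cons, List.countP_cons]
      simp
    | succ cn =>
      simp only [List.length_cons, Nat.succ_lt_succ_iff] at h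
      simp only [List.getD_cons_succ] at hf
      rw [List.set_cons_succ, List.countP_cons, List.countP_cons]
      have := ih cn h hf
      omega

lemma pvUnvis_cons (a : List Bool) (l : List (List Bool)) :
    pvUnvis (a :: l) = a.countP (fun b => b = false) + pvUnvis l := by
  simp [pvUnvis]

lemma pvUnvisAux_le (v : List (List Bool)) : ∀ (rn cn : Nat),
    pvUnvis (v.set rn ((v.getD rn []).set cn true)) ≤ pvUnvis v := by
  induction v with
  | nil => intro rn cn; simp
  | cons a l ih =>
    intro rn cn
    cases rn with
    | zero =>
      rw [List.getD_cons_zero, List.set_cons_zero, pvUnvis_cons, pvUnvis_cons]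
      have := pvCountP_set_le a cn
      omega
    | succ rn =>
      rw [List.getD_cons_succ, List.set_cons_succ, pvUnvis_cons, pvUnvis_cons]
      have := ih rn cn
      omega

lemma pvUnvisAux_lt (v : List (List Bool)) : ∀ (rn cn : Nat), rn < v.length →
    cn < (v.getD rn []).length → (v.getD rn []).getD cn false = false →
    pvUnvis (v.set rn ((v.getD rn []).set cn true)) < pvUnvis v := by
  induction v with
  | nil => intro rn cn h; simp at h
  | cons a l ih =>
    intro rn cn h hc hf
    cases rn with
    | zero =>
      rw [List.getD_cons_zero] at hc hf
      rw [List.getD_cons_zero, List.set_cons_zero, pvUnvis_cons, pvUnvis_cons]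
      have := pvCountP_set_lt a cn hc hf
      omega
    | succ rn =>
      simp only [List.length_cons, Nat.succ_lt_succ_iff] at h
      rw [List.getD_cons_succ] at hc hf
      rw [List.getD_cons_succ, List.set_cons_succ, pvUnvis_cons, pvUnvis_cons]
      have := ih rn cn h hc hf
      omega

lemma pvUnvis_set_le (v : List (List Bool)) (r c : Int) :
    pvUnvis (pvVSet v r c) ≤ pvUnvis v := pvUnvisAux_le v r.toNat c.toNat

lemma pvUnvis_set_lt (R C : Nat) (v : List (List Bool)) (r c : Int)
    (hs : pvShape R C v) (hr0 : 0 ≤ r) (hrR : r < (R : Int))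
    (hc0 : 0 ≤ c) (hcC : c < (C : Int)) (hf : pvVGet v r c = false) :
    pvUnvis (pvVSet v r c) < pvUnvis v := by
  have h1 := hs.1
  have hr : r.toNat < v.length := by omega
  have hrow : v.getD r.toNat [] ∈ v := by
    rw [List.getD_eq_getElem v [] hr]; exact List.getElem_mem hr
  have hlen : (v.getD r.toNat []).length = C := hs.2 _ hrow
  have hc : c.toNat < (v.getD r.toNat []).length := by omega
  exact pvUnvisAux_lt v r.toNat c.toNat hr hc hf

lemma pvShape_vset (R C : Nat) (v : List (List Bool)) (r c : Int)
    (h : pvShape R C v) : pvShape R C (pvVSet v r c) := by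
  by_cases hr : r.toNat < v.length
  · constructor
    · rw [pvVSet, List.length_set]; exact h.1
    · intro row hrow
      rcases List.mem_or_eq_of_mem_set hrow with hm | he
      · exact h.2 _ hm
      · subst he
        rw [List.length_set]
        exact h.2 _ (by rw [List.getD_eq_getElem v [] hr]; exact List.getElem_mem hr)
  · rw [pvVSet, List.set_eq_of_length_le (by omega)]
    exact h

lemma pvUnvis_le (C : Nat) (v : List (List Bool)) : ∀ (R : Nat), pvShape R C v →
    pvUnvis v ≤ R * C := by
  induction v with
  | nil => intro R _; simp [pvUnvis]
  | cons a l ih =>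
    intro R hs
    have h1 := hs.1
    have hR : R = l.length + 1 := by simp at h1; omega
    subst hR
    rw [pvUnvis_cons]
    have ha : a.countP (fun b => b = false) ≤ C := by
      have := hs.2 a (by simp)
      calc a.countP (fun b => b = false) ≤ a.length := List.countP_le_length
        _ = C := this
    have hl : pvUnvis l ≤ l.length * C := ih l.length ⟨rfl, fun row hm => hs.2 row (by simp [hm])⟩
    calc a.countP (fun b => b = false) + pvUnvis l ≤ C + l.length * C := by omega
      _ = (l.length + 1) * C := by ring

-- reading a list after a set: same index / other index
lemma pvGetD_set_eq {α : Type _} (l : List α) (i : Nat) (x d : α) (h : i < l.length) :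
    (l.set i x).getD i d = x := by
  rw [List.getD_eq_getElem _ _ (by simpa using h)]; simp

lemma pvGetD_set_ne {α : Type _} (l : List α) (i j : Nat) (x d : α) (h : i ≠ j) :
    (l.set i x).getD j d = l.getD j d := by
  simp [List.getD, List.getElem?_set_ne h]

-- visited-grid reads after a write
lemma pvVGet_vset_self (R C : Nat) (v : List (List Bool)) (r c : Int)
    (hs : pvShape R C v) (hr0 : 0 ≤ r) (hrR : r < (R : Int))
    (hc0 : 0 ≤ c) (hcC : c < (C : Int)) : pvVGet (pvVSet v r c) r c = true := by
  have h1 := hs.1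
  have hr : r.toNat < v.length := by omega
  have hrow : v.getD r.toNat [] ∈ v := by
    rw [List.getD_eq_getElem v [] hr]; exact List.getElem_mem hr
  have hc : c.toNat < (v.getD r.toNat []).length := by
    rw [hs.2 _ hrow]; omega
  rw [pvVGet, pvVSet, pvGetD_set_eq _ _ _ _ hr, pvGetD_set_eq _ _ _ _ hc]

lemma pvVGet_vset_ne (v : List (List Bool)) (r c r' c' : Int)
    (h : r'.toNat ≠ r.toNat ∨ c'.toNat ≠ c.toNat) :
    pvVGet (pvVSet v r c) r' c' = pvVGet v r' c' := by
  simp only [pvVGet, pvVSet]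
  by_cases hr : r'.toNat = r.toNat
  · have hc : c'.toNat ≠ c.toNat := by
      rcases h with h | h
      · exact absurd hr h
      · exact h
    rw [hr]
    by_cases hlt : r.toNat < v.length
    · rw [pvGetD_set_eq _ _ _ _ hlt, pvGetD_set_ne _ _ _ _ _ (fun he => hc he.symm)]
    · rw [List.set_eq_of_length_le (by omega)]
  · rw [pvGetD_set_ne _ _ _ _ _ (fun he => hr he.symm)]

-- grid reads after a write at a different cell
lemma pvGGet_gset_ne (g : List (List Int)) (r c r' c' v : Int)
    (h : r'.toNat ≠ r.toNat ∨ c'.toNat ≠ c.toNat) :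
    pvGGet (pvGSet g r c v) r' c' = pvGGet g r' c' := by
  simp only [pvGGet, pvGSet]
  by_cases hr : r'.toNat = r.toNat
  · have hc : c'.toNat ≠ c.toNat := by
      rcases h with h | h
      · exact absurd hr h
      · exact h
    rw [hr]
    by_cases hlt : r.toNat < g.length
    · rw [pvGetD_set_eq _ _ _ _ hlt, pvGetD_set_ne _ _ _ _ _ (fun he => hc he.symm)]
    · rw [List.set_eq_of_length_le (by omega)]
  · rw [pvGetD_set_ne _ _ _ _ _ (fun he => hr he.symm)]

-- the decrement loop changes only the worlds component
lemma pvDecSnd (rows cols r c : Int) (s1 : List (List Int) × List (List Bool)) :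
    (pvMoves.foldl (fun t d =>
      if 0 ≤ r + d.1 ∧ r + d.1 < rows ∧ 0 ≤ c + d.2 ∧ c + d.2 < cols ∧
         pvGGet t.1 (r + d.1) (c + d.2) = 0 ∧ pvVGet t.2 (r + d.1) (c + d.2) = false
      then (pvGSet t.1 r c (max 0 (pvGGet t.1 r c - 1)), t.2) else t) s1).2 = s1.2 := by
  refine pvFoldlInv (fun t => t.2 = s1.2) _ ?_ pvMoves s1 rfl
  intro t d ht
  split_ifs <;> simpa using ht

-- and it leaves every cell other than (r, c) unchanged
lemma pvDecFst_ne (rows cols r c r' c' : Int)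
    (hne : r'.toNat ≠ r.toNat ∨ c'.toNat ≠ c.toNat)
    (s1 : List (List Int) × List (List Bool)) :
    pvGGet (pvMoves.foldl (fun t d =>
      if 0 ≤ r + d.1 ∧ r + d.1 < rows ∧ 0 ≤ c + d.2 ∧ c + d.2 < cols ∧
         pvGGet t.1 (r + d.1) (c + d.2) = 0 ∧ pvVGet t.2 (r + d.1) (c + d.2) = false
      then (pvGSet t.1 r c (max 0 (pvGGet t.1 r c - 1)), t.2) else t) s1).1 r' c' =
    pvGGet s1.1 r' c' := by
  refine pvFoldlInv (fun t => pvGGet t.1 r' c' = pvGGet s1.1 r' c') _ ?_ pvMoves s1 rfl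
  intro t d ht
  split_ifs
  · simpa [pvGGet_gset_ne t.1 r c r' c' _ hne] using ht
  · exact ht

lemma pvMeltA_inv (R C : Nat) (f : Nat) :
    ∀ (s : List (List Int) × List (List Bool)) (r c : Int), pvShape R C s.2 →
      pvShape R C (pvMeltA (R : Int) (C : Int) f s r c).2 ∧
      pvUnvis (pvMeltA (R : Int) (C : Int) f s r c).2 ≤ pvUnvis s.2 := by
  induction f with
  | zero => intro s r c hs; simp only [pvMeltA]; exact ⟨hs, le_rfl⟩
  | succ f ih =>
    intro s r c hs
    simp only [pvMeltA]
    refine pvFoldlInv (fun t : List (List Int) × List (List Bool) => pvShape R C t.2 ∧ pvUnvis t.2 ≤ pvUnvis s.2) _ ?_ pvMoves _ ?_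
    · intro t d ht
      split_ifs
      · exact ⟨(ih t _ _ ht.1).1, le_trans (ih t _ _ ht.1).2 ht.2⟩
      · exact ht
    · refine ⟨?_, ?_⟩
      · rw [pvDecSnd]; exact pvShape_vset _ _ _ _ _ hs
      · rw [pvDecSnd]; exact pvUnvis_set_le _ _ _

lemma pvMeltA_fuel (R C : Nat) :
    ∀ (n : Nat) (s : List (List Int) × List (List Bool)) (r c : Int) (f g : Nat),
      pvShape R C s.2 → pvUnvis s.2 ≤ n →
      0 ≤ r → r < (R : Int) → 0 ≤ c → c < (C : Int) → pvVGet s.2 r c = false →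
      n < f → n < g →
      pvMeltA (R : Int) (C : Int) f s r c = pvMeltA (R : Int) (C : Int) g s r c := by
  intro n
  induction n using Nat.strong_induction_on with
  | _ n ihn =>
    intro s r c f g hs hu hr0 hrR hc0 hcC hv hf hg
    have hlt : pvUnvis (pvVSet s.2 r c) < pvUnvis s.2 :=
      pvUnvis_set_lt R C s.2 r c hs hr0 hrR hc0 hcC hv
    match f, g with
    | f + 1, g + 1 =>
      simp only [pvMeltA]
      apply pvFoldlCongrMem (fun t => pvShape R C t.2 ∧ pvUnvis t.2 + 1 ≤ n)
      · intro t d _ ht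
        split_ifs with hc
        · exact ihn (pvUnvis t.2) (by omega) t _ _ f g ht.1 le_rfl hc.1 hc.2.1 hc.2.2.1
            hc.2.2.2.1 hc.2.2.2.2.2 (by omega) (by omega)
        · rfl
      · intro t d _ ht
        split_ifs
        · exact ⟨(pvMeltA_inv R C f t _ _ ht.1).1,
            le_trans (Nat.add_le_add_right (pvMeltA_inv R C f t _ _ ht.1).2 1) ht.2⟩
        · exact ht
      · refine ⟨?_, ?_⟩
        · rw [pvDecSnd]; exact pvShape_vset _ _ _ _ _ hs
        · rw [pvDecSnd]
          show pvUnvis (pvVSet s.2 r c) + 1 ≤ n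
          omega

-- A's recursion folded over a worklist
def pvAList (rows cols : Int) (f : Nat) (s : List (List Int) × List (List Bool))
    (l : List (Int × Int)) : List (List Int) × List (List Bool) :=
  l.foldl (fun t p =>
    if 0 ≤ p.1 ∧ p.1 < rows ∧ 0 ≤ p.2 ∧ p.2 < cols ∧
       ¬ pvGGet t.1 p.1 p.2 = 0 ∧ pvVGet t.2 p.1 p.2 = false
    then pvMeltA rows cols f t p.1 p.2 else t) s

lemma pvAList_fuel (R C : Nat) (n f g : Nat) (l : List (Int × Int))
    (s : List (List Int) × List (List Bool)) (hs : pvShape R C s.2)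
    (hu : pvUnvis s.2 ≤ n) (hf : n < f) (hg : n < g) :
    pvAList (R : Int) (C : Int) f s l = pvAList (R : Int) (C : Int) g s l := by
  apply pvFoldlCongrMem (fun t => pvShape R C t.2 ∧ pvUnvis t.2 ≤ n)
  · intro t d _ ht
    split_ifs with hc
    · exact pvMeltA_fuel R C (pvUnvis t.2) t _ _ f g ht.1 le_rfl hc.1 hc.2.1 hc.2.2.1
        hc.2.2.2.1 hc.2.2.2.2.2 (by omega) (by omega)
    · rfl
  · intro t d _ ht
    split_ifs
    · exact ⟨(pvMeltA_inv R C f t _ _ ht.1).1, le_trans (pvMeltA_inv R C f t _ _ ht.1).2 ht.2⟩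
    · exact ht
  · exact ⟨hs, hu⟩

lemma pvMeltA_succ (rows cols : Int) (f : Nat) (s : List (List Int) × List (List Bool))
    (r c : Int) :
    pvMeltA rows cols (f + 1) s r c =
    pvMoves.foldl (fun t d =>
      if 0 ≤ r + d.1 ∧ r + d.1 < rows ∧ 0 ≤ c + d.2 ∧ c + d.2 < cols ∧
         ¬ pvGGet t.1 (r + d.1) (c + d.2) = 0 ∧ pvVGet t.2 (r + d.1) (c + d.2) = false
      then pvMeltA rows cols f t (r + d.1) (c + d.2) else t)
      (pvMoves.foldl (fun t d =>
        if 0 ≤ r + d.1 ∧ r + d.1 < rows ∧ 0 ≤ c + d.2 ∧ c + d.2 < cols ∧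
           pvGGet t.1 (r + d.1) (c + d.2) = 0 ∧ pvVGet t.2 (r + d.1) (c + d.2) = false
        then (pvGSet t.1 r c (max 0 (pvGGet t.1 r c - 1)), t.2) else t)
        (s.1, pvVSet s.2 r c)) := rfl

lemma pvAList_cons (rows cols : Int) (f : Nat) (s : List (List Int) × List (List Bool))
    (p : Int × Int) (l : List (Int × Int)) :
    pvAList rows cols f s (p :: l) =
    pvAList rows cols f
      (if 0 ≤ p.1 ∧ p.1 < rows ∧ 0 ≤ p.2 ∧ p.2 < cols ∧
          ¬ pvGGet s.1 p.1 p.2 = 0 ∧ pvVGet s.2 p.1 p.2 = false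
       then pvMeltA rows cols f s p.1 p.2 else s) l := rfl

lemma pvAList_append (rows cols : Int) (f : Nat) (s : List (List Int) × List (List Bool))
    (l1 l2 : List (Int × Int)) :
    pvAList rows cols f s (l1 ++ l2) = pvAList rows cols f (pvAList rows cols f s l1) l2 := by
  simp [pvAList]

lemma pvAList_map_moves (rows cols : Int) (f : Nat) (s : List (List Int) × List (List Bool))
    (r c : Int) :
    pvAList rows cols f s (pvMoves.map (fun d => (r + d.1, c + d.2))) =
    pvMoves.foldl (fun t d =>
      if 0 ≤ r + d.1 ∧ r + d.1 < rows ∧ 0 ≤ c + d.2 ∧ c + d.2 < cols ∧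
         ¬ pvGGet t.1 (r + d.1) (c + d.2) = 0 ∧ pvVGet t.2 (r + d.1) (c + d.2) = false
      then pvMeltA rows cols f t (r + d.1) (c + d.2) else t) s := by
  rw [pvAList, List.foldl_map]

-- B's pushed neighbour block is A's mapped move list
lemma pvStackEq (p : Int × Int) (rest : List (Int × Int)) :
    (p.1 - 1, p.2) :: (p.1 + 1, p.2) :: (p.1, p.2 - 1) :: (p.1, p.2 + 1) :: rest =
    pvMoves.map (fun d => (p.1 + d.1, p.2 + d.2)) ++ rest := by
  simp [pvMoves, Int.sub_eq_add_neg]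

-- the invariant survives one visit step of A (mark visited + decrement loop)
lemma pvInvStep (W : List (List Int)) (R C : Nat)
    (s : List (List Int) × List (List Bool)) (vis : List (Int × Int)) (p : Int × Int)
    (hinv : pvInv W R C s vis)
    (hr0 : 0 ≤ p.1) (hrR : p.1 < (R : Int)) (hc0 : 0 ≤ p.2) (hcC : p.2 < (C : Int)) :
    pvInv W R C
      (pvMoves.foldl (fun t d =>
        if 0 ≤ p.1 + d.1 ∧ p.1 + d.1 < (R : Int) ∧ 0 ≤ p.2 + d.2 ∧ p.2 + d.2 < (C : Int) ∧
           pvGGet t.1 (p.1 + d.1) (p.2 + d.2) = 0 ∧ pvVGet t.2 (p.1 + d.1) (p.2 + d.2) = false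
        then (pvGSet t.1 p.1 p.2 (max 0 (pvGGet t.1 p.1 p.2 - 1)), t.2) else t)
        (s.1, pvVSet s.2 p.1 p.2))
      (PySem.Set.add vis p) := by
  obtain ⟨hsh, hmem, hrange, hagree⟩ := hinv
  have hsnd := pvDecSnd (R : Int) (C : Int) p.1 p.2 (s.1, pvVSet s.2 p.1 p.2)
  refine ⟨?_, ?_, ?_, ?_⟩
  · rw [hsnd]; exact pvShape_vset _ _ _ _ _ hsh
  · intro r c h0 hR h1 hC
    rw [hsnd]
    show pvVGet (pvVSet s.2 p.1 p.2) r c = true ↔ (r, c) ∈ PySem.Set.add vis p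
    rw [PySem.Set.mem_add vis p (r, c)]
    by_cases he : r = p.1 ∧ c = p.2
    · rw [he.1, he.2, pvVGet_vset_self R C s.2 p.1 p.2 hsh hr0 hrR hc0 hcC]
      simp
    · have hne : r.toNat ≠ p.1.toNat ∨ c.toNat ≠ p.2.toNat := by
        rcases not_and_or.mp he with h | h
        · left; omega
        · right; omega
      rw [pvVGet_vset_ne s.2 p.1 p.2 r c hne, hmem r c h0 hR h1 hC]
      constructor
      · exact fun h => Or.inl h
      · rintro (h | h)
        · exact h
        · exact absurd (Prod.ext_iff.mp h) he
  · intro q hq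
    rcases (PySem.Set.mem_add vis p q).mp hq with h | h
    · exact hrange q h
    · rw [h]; exact ⟨hr0, hrR, hc0, hcC⟩
  · intro r c h0 hR h1 hC hvf
    rw [hsnd] at hvf
    have hne : r.toNat ≠ p.1.toNat ∨ c.toNat ≠ p.2.toNat := by
      by_contra hcon
      rw [not_or, not_not, not_not] at hcon
      have : r = p.1 ∧ c = p.2 := ⟨by omega, by omega⟩
      rw [this.1, this.2, pvVGet_vset_self R C s.2 p.1 p.2 hsh hr0 hrR hc0 hcC] at hvf
      simp at hvf
    have hvf' : pvVGet s.2 r c = false := by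
      rwa [pvVGet_vset_ne s.2 p.1 p.2 r c hne] at hvf
    rw [pvDecFst_ne (R : Int) (C : Int) p.1 p.2 r c hne]
    exact hagree r c h0 hR h1 hC hvf'

-- the coupled bridge: B's stack loop and A's worklist fold keep the invariant in lock-step
set_option maxHeartbeats 1000000 in
lemma pvBridge (W : List (List Int)) (R C : Nat) :
    ∀ (fB : Nat) (s : List (List Int) × List (List Bool)) (vis : List (Int × Int))
      (st : List (Int × Int)) (f : Nat),
      pvInv W R C s vis → 5 * pvUnvis s.2 + st.length ≤ fB → pvUnvis s.2 < f →
      pvInv W R C (pvAList (R : Int) (C : Int) f s st)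
        (pvFloodB W (R : Int) (C : Int) fB vis st) := by
  intro fB
  induction fB with
  | zero =>
    intro s vis st f hinv hlen hf
    match st with
    | [] => simpa [pvFloodB, pvAList] using hinv
    | p :: rest => exfalso; simp only [List.length_cons] at hlen; omega
  | succ fB ih =>
    intro s vis st f hinv hlen hf
    match st with
    | [] => simpa [pvFloodB, pvAList] using hinv
    | p :: rest =>
      simp only [pvFloodB]
      have hcond : (0 ≤ p.1 ∧ p.1 < (R : Int) ∧ 0 ≤ p.2 ∧ p.2 < (C : Int) ∧
          ¬ (W.getD p.1.toNat []).getD p.2.toNat 0 = 0 ∧ ¬ p ∈ vis) ↔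
          (0 ≤ p.1 ∧ p.1 < (R : Int) ∧ 0 ≤ p.2 ∧ p.2 < (C : Int) ∧
          ¬ pvGGet s.1 p.1 p.2 = 0 ∧ pvVGet s.2 p.1 p.2 = false) := by
        constructor
        · rintro ⟨h1, h2, h3, h4, h5, h6⟩
          have hv : pvVGet s.2 p.1 p.2 = false := by
            rcases Bool.eq_false_or_eq_true (pvVGet s.2 p.1 p.2) with h | h
            · exact absurd ((hinv.2.1 p.1 p.2 h1 h2 h3 h4).mp h) h6
            · exact h
          refine ⟨h1, h2, h3, h4, ?_, hv⟩
          rw [hinv.2.2.2 p.1 p.2 h1 h2 h3 h4 hv]; exact h5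
        · rintro ⟨h1, h2, h3, h4, h5, h6⟩
          refine ⟨h1, h2, h3, h4, ?_, ?_⟩
          · show ¬ pvGGet W p.1 p.2 = 0
            rw [← hinv.2.2.2 p.1 p.2 h1 h2 h3 h4 h6]; exact h5
          · intro hm
            rw [(hinv.2.1 p.1 p.2 h1 h2 h3 h4).mpr hm] at h6
            simp at h6
      by_cases hq : 0 ≤ p.1 ∧ p.1 < (R : Int) ∧ 0 ≤ p.2 ∧ p.2 < (C : Int) ∧
          ¬ pvGGet s.1 p.1 p.2 = 0 ∧ pvVGet s.2 p.1 p.2 = false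
      · rw [if_pos (hcond.mpr hq)]
        have hlt : pvUnvis (pvVSet s.2 p.1 p.2) < pvUnvis s.2 :=
          pvUnvis_set_lt R C s.2 p.1 p.2 hinv.1 hq.1 hq.2.1 hq.2.2.1 hq.2.2.2.1 hq.2.2.2.2.2
        have hdec := pvDecSnd (R : Int) (C : Int) p.1 p.2 (s.1, pvVSet s.2 p.1 p.2)
        have hinv2 := pvInvStep W R C s vis p hinv hq.1 hq.2.1 hq.2.2.1 hq.2.2.2.1
        set s2 := pvMoves.foldl (fun t d =>
            if 0 ≤ p.1 + d.1 ∧ p.1 + d.1 < (R : Int) ∧ 0 ≤ p.2 + d.2 ∧ p.2 + d.2 < (C : Int) ∧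
               pvGGet t.1 (p.1 + d.1) (p.2 + d.2) = 0 ∧ pvVGet t.2 (p.1 + d.1) (p.2 + d.2) = false
            then (pvGSet t.1 p.1 p.2 (max 0 (pvGGet t.1 p.1 p.2 - 1)), t.2) else t)
            (s.1, pvVSet s.2 p.1 p.2) with hs2def
        have hu2 : pvUnvis s2.2 < pvUnvis s.2 := by
          rw [hs2def, hdec]; exact hlt
        rw [pvStackEq]
        have hres := ih s2 (PySem.Set.add vis p)
          (pvMoves.map (fun d => (p.1 + d.1, p.2 + d.2)) ++ rest) f hinv2
          (by
            simp only [List.length_append, List.length_map, List.length_cons, pvMoves,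
              List.length_nil] at *
            omega)
          (by omega)
        rw [pvAList_cons _ _ _ _ _ rest, if_pos hq]
        match f, hf with
        | f + 1, _ =>
          have hAeq : pvAList (R : Int) (C : Int) (f + 1) (pvMeltA (R : Int) (C : Int) (f + 1) s p.1 p.2) rest =
              pvAList (R : Int) (C : Int) (f + 1) s2
                (pvMoves.map (fun d => (p.1 + d.1, p.2 + d.2)) ++ rest) := by
            rw [pvAList_append]
            congr 1
            rw [pvMeltA_succ, ← hs2def]
            rw [pvAList_fuel R C (pvUnvis s.2 - 1) (f + 1) f _ _ hinv2.1 (by omega) (by omega)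
              (by omega)]
            rw [pvAList_map_moves]
          rw [hAeq]
          exact hres
      · rw [if_neg (fun h => hq (hcond.mp h))]
        rw [pvAList_cons _ _ _ _ _ rest, if_neg hq]
        exact ih s vis rest f hinv (by simp only [List.length_cons] at hlen; omega) hf

-- one seeded component: A's recursive melt and B's flood fill preserve the invariant
set_option maxHeartbeats 1000000 in
lemma pvCell (W : List (List Int)) (R C : Nat)
    (s : List (List Int) × List (List Bool)) (vis : List (Int × Int)) (r c : Int)
    (hinv : pvInv W R C s vis)
    (hq : 0 ≤ r ∧ r < (R : Int) ∧ 0 ≤ c ∧ c < (C : Int) ∧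
      ¬ pvGGet s.1 r c = 0 ∧ pvVGet s.2 r c = false) :
    pvInv W R C (pvMeltA (R : Int) (C : Int) (R * C + 1) s r c)
      (pvFloodB W (R : Int) (C : Int) (5 * (R * C + 1)) vis [(r, c)]) := by
  have hu := pvUnvis_le C s.2 R hinv.1
  have hb := pvBridge W R C (5 * (R * C + 1)) s vis [(r, c)] (R * C + 1) hinv
    (by simp only [List.length_cons, List.length_nil]; omega) (by omega)
  rw [pvAList_cons, if_pos hq] at hb
  simpa only [pvAList, List.foldl_nil] using hb

lemma pvVGet_init (R C : Nat) (r c : Int) :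
    pvVGet (List.replicate R (List.replicate C false)) r c = false := by
  rw [pvVGet]
  have hrow : (List.replicate R (List.replicate C false)).getD r.toNat [] =
      List.replicate C false ∨
      (List.replicate R (List.replicate C false)).getD r.toNat [] = [] := by
    by_cases hr : r.toNat < R
    · left
      rw [List.getD_eq_getElem _ _ (by simpa using hr), List.getElem_replicate]
    · right
      rw [List.getD_eq_default _ _ (by simpa using hr)]
  rcases hrow with h | h <;> rw [h]
  · by_cases hc : c.toNat < C
    · rw [List.getD_eq_getElem _ _ (by simpa using hc), List.getElem_replicate]
    · rw [List.getD_eq_default _ _ (by simpa using hc)]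
  · rfl

-- ===== VERDICT (by name: the statement is the Claim_ definition above) =====
set_option maxHeartbeats 1000000 in
theorem melt_down_1_year_spec : Claim_equal_melt_down_1_year := by
  intro worlds _hdom _hpre
  unfold Spec_melt_down_1_year
  simp only [melt_down_1_year, melt_down_1_year_alt]
  refine (pvFoldlRel
    (fun (a : (List (List Int) × List (List Bool)) × Int)
         (b : PySem.Set (Int × Int) × Int) =>
      pvInv worlds worlds.length (worlds.headD []).length a.1 b.1 ∧ a.2 = b.2)
    _ _ _ ?_ _ _ ?_).2
  · intro a b r hr hab
    refine pvFoldlRel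
      (fun (a : (List (List Int) × List (List Bool)) × Int)
           (b : PySem.Set (Int × Int) × Int) =>
        pvInv worlds worlds.length (worlds.headD []).length a.1 b.1 ∧ a.2 = b.2)
      _ _ _ ?_ a b hab
    intro a b c hc hab
    have hr' := PySem.List.mem_pyRange_one.mp hr
    have hc' := PySem.List.mem_pyRange_one.mp hc
    have h1 : 0 ≤ r := by omega
    have h2 : r < (worlds.length : Int) := by omega
    have h3 : 0 ≤ c := by omega
    have h4 : c < ((worlds.headD []).length : Int) := by omega
    obtain ⟨hinv, hcnt⟩ := hab
    by_cases htop : 0 < pvGGet a.1.1 r c ∧ pvVGet a.1.2 r c = false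
    · have htopB : 0 < (worlds.getD r.toNat []).getD c.toNat 0 ∧ ¬ (r, c) ∈ b.1 := by
        constructor
        · have := hinv.2.2.2 r c h1 h2 h3 h4 htop.2
          rw [show ((worlds.getD r.toNat []).getD c.toNat 0) = pvGGet worlds r c from rfl,
            ← this]
          exact htop.1
        · intro hm
          rw [(hinv.2.1 r c h1 h2 h3 h4).mpr hm] at htop
          simp at htop
      rw [if_pos htop, if_pos htopB]
      refine ⟨?_, by simp [hcnt]⟩
      exact pvCell worlds worlds.length (worlds.headD []).length a.1 b.1 r c hinv
        ⟨h1, h2, h3, h4, by omega, htop.2⟩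
    · have htopB : ¬ (0 < (worlds.getD r.toNat []).getD c.toNat 0 ∧ ¬ (r, c) ∈ b.1) := by
        intro hB
        apply htop
        have hv : pvVGet a.1.2 r c = false := by
          rcases Bool.eq_false_or_eq_true (pvVGet a.1.2 r c) with h | h
          · exact absurd ((hinv.2.1 r c h1 h2 h3 h4).mp h) hB.2
          · exact h
        refine ⟨?_, hv⟩
        rw [show pvGGet a.1.1 r c = pvGGet worlds r c from
          hinv.2.2.2 r c h1 h2 h3 h4 hv]
        exact hB.1
      rw [if_neg htop, if_neg htopB]
      exact ⟨hinv, hcnt⟩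
  · refine ⟨⟨⟨by simp, ?_⟩, ?_, ?_, ?_⟩, rfl⟩
    · intro row hrow
      rw [List.eq_of_mem_replicate hrow]; simp
    · intro r c _ _ _ _
      rw [pvVGet_init]
      simp [PySem.Set.empty]
    · intro p hp
      simp [PySem.Set.empty] at hp
    · intro r c _ _ _ _ _
      rfl
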